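-- pv_equiv track=rewrite | github.com/pypi-data/pypi-mirror-403 | packages/stario/stario-2.0.5.tar.gz/stario-2.0.5/src/stario/telemetry/rich.py | _group_attributes
-- ===== SOURCE A (Python) =====
-- from typing import Any
--
-- def _group_attributes(attrs: dict[str, Any]) -> list[tuple[str, str, bool]]:
--     """
--     Group and format attributes by common prefix for compact tree display.
--
--     All dotted keys are grouped by their prefix (all-but-last segment).
--     Keys without dots are shown as flat entries.
--
--     Returns list of (display_key, value, is_header) tuples:
--     - Headers: (prefix, "", True) - group header with no value
--     - Values: (".suffix", value, False) - indented suffix with value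
--     - Flat: (full_key, value, False) - standalone key (no dot prefix)
--
--     Example:
--         server.graceful_timeout: 5.0         →  server                (header)
--         server.workers: 1                          .graceful_timeout  5.0
--         server.worker.0.connections: 1             .workers           1
--         response.status_code: 200                server.worker.0      (header)
--         hello: world                               .connections       1
--                                                  response             (header)
--                                                    .status_code       200
--                                                  hello                world (flat)
--     """
--     if not attrs:
--         return []
--
--     # Group by prefix (all but last dot segment)
--     grouped: dict[str, list[tuple[str, str]]] = {}  # prefix -> [(suffix, value), ...]
--     flat: list[tuple[str, str]] = []  # [(key, value), ...] for keys without dots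
--
--     for key, value in attrs.items():
--         parts = key.rsplit(".", 1)
--         if len(parts) == 2:
--             prefix, suffix = parts
--             grouped.setdefault(prefix, []).append((suffix, str(value)))
--         else:
--             flat.append((key, str(value)))
--
--     # Build result: prefixes sorted, then flat keys sorted
--     result: list[tuple[str, str, bool]] = []
--
--     for prefix in sorted(grouped.keys()):
--         # Header for the prefix
--         result.append((prefix, "", True))
--         # Values sorted by suffix
--         for suffix, value in sorted(grouped[prefix]):
--             result.append((f".{suffix}", value, False))
--
--     # Flat keys (no dots) - sorted, not indented
--     for key, value in sorted(flat):
--         result.append((key, value, False))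
--
--     return result
-- ===== SOURCE B (Python) =====
-- def _group_attributes(attrs):
--     """One global sort + linear sweep instead of dict grouping with per-group sorts."""
--     triples = []  # (prefix, suffix, value) for dotted keys
--     flat = []     # (key, value) for dotless keys
--     for key, value in attrs.items():
--         parts = key.rsplit(".", 1)
--         if len(parts) == 2:
--             triples.append((parts[0], parts[1], str(value)))
--         else:
--             flat.append((key, str(value)))
--     result = []
--     prev = None
--     for prefix, suffix, value in sorted(triples, key=lambda t: (t[0], t[1])):
--         if prev != prefix:
--             result.append((prefix, "", True))
--             prev = prefix
--         result.append((f".{suffix}", value, False))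
--     for key, value in sorted(flat):
--         result.append((key, value, False))
--     return result
-- ===== Notes on version B (the rewrite author's own statement) =====
-- stated objective: alternative
-- what changed: Replaces A's prefix-keyed dict (setdefault grouping, sort of the key set, then a per-group sort inside each prefix) by one flat list of (prefix, suffix, value) triples, a single global sort by (prefix, suffix), and a boundary-detecting linear sweep that emits a header whenever the prefix changes.
import Mathlib
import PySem

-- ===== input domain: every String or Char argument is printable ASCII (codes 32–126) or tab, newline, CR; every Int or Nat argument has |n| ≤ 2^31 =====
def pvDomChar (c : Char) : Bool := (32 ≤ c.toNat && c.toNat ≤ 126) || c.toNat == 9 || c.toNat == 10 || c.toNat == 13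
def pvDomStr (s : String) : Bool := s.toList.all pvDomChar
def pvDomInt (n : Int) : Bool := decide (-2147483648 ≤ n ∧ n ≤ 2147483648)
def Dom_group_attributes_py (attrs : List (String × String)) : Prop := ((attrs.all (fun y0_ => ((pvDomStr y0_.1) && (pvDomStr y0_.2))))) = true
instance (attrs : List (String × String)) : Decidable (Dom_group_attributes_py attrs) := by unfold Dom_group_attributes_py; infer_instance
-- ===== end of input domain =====

-- B replaces A's prefix-keyed dict grouping (setdefault + per-group sorts) by one global
-- sort of (prefix, suffix, value) triples and a boundary-detecting linear sweep (objective: alternative).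

-- ===== PORT A =====
-- shared primitive: key.rsplit(".", 1) — some (before, after) split at the LAST '.', none if no '.'
-- (exact: Python returns a 2-element list iff the key contains a dot)
def rsplitDot : List Char → Option (List Char × List Char)
  | [] => none
  | c :: rest =>
    match rsplitDot rest with
    | some ps => some (c :: ps.1, ps.2)
    | none => if c = '.' then some ([], rest) else none

def group_attributes_py (attrs : List (String × String)) : List (String × String × Bool) :=
  if attrs = [] then []
  else
    -- grouping loop: grouped.setdefault(prefix, []).append((suffix, str(value))) / flat.append
    let st := attrs.foldl
      (fun (st : PySem.Dict String (List (String × String)) × List (String × String)) kv =>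
        match rsplitDot kv.1.toList with
        | some ps => (st.1.modify (String.ofList ps.1) [] (· ++ [(String.ofList ps.2, kv.2)]), st.2)
        | none => (st.1, st.2 ++ [(kv.1, kv.2)]))
      (PySem.Dict.empty, [])
    -- for prefix in sorted(grouped.keys()): header, then values sorted by (suffix, value) tuple
    -- (grouped[prefix] is always present for prefix in keys; ported as getD)
    let result := (PySem.List.sorted st.1.keys (fun k => k)).foldl
      (fun res p =>
        (PySem.List.sorted (st.1.getD p []) (fun sv => toLex sv)).foldl
          (fun r sv => r ++ [("." ++ sv.1, sv.2, false)])
          (res ++ [(p, "", true)]))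
      []
    -- flat keys sorted by (key, value) tuple
    (PySem.List.sorted st.2 (fun kv => toLex kv)).foldl
      (fun r kv => r ++ [(kv.1, kv.2, false)]) result

-- ===== PORT B =====
def group_attributes_py_alt (attrs : List (String × String)) : List (String × String × Bool) :=
  -- collection loop: triples.append((prefix, suffix, str(value))) / flat.append
  let st := attrs.foldl
    (fun (st : List (String × String × String) × List (String × String)) kv =>
      match rsplitDot kv.1.toList with
      | some ps => (st.1 ++ [(String.ofList ps.1, String.ofList ps.2, kv.2)], st.2)
      | none => (st.1, st.2 ++ [(kv.1, kv.2)]))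
    ([], [])
  -- sweep over the globally sorted triples (key = (prefix, suffix) tuple, lexicographic)
  let swept := (PySem.List.sorted st.1 (fun t => toLex (t.1, t.2.1))).foldl
    (fun (acc : List (String × String × Bool) × Option String) t =>
      let acc1 := if acc.2 ≠ some t.1 then (acc.1 ++ [(t.1, "", true)], some t.1) else acc
      (acc1.1 ++ [("." ++ t.2.1, t.2.2, false)], acc1.2))
    ([], none)
  -- flat keys sorted by (key, value) tuple
  swept.1 ++ (PySem.List.sorted st.2 (fun kv => toLex kv)).map (fun kv => (kv.1, kv.2, false))

-- ===== PRECONDITION & SPEC =====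
-- Pre_ excludes association lists with duplicate keys: attrs is a Python dict, whose keys are
-- necessarily distinct, so a duplicate-key list represents no dict input (the list-level ports
-- would process both entries of a pair of duplicates).
def Pre_group_attributes_py (attrs : List (String × String)) : Prop :=
  (attrs.map (·.1)).Nodup
instance (attrs : List (String × String)) : Decidable (Pre_group_attributes_py attrs) := by
  unfold Pre_group_attributes_py; infer_instance

def pvWitness_group_attributes_py : (List (String × String)) :=
  [("server.timeout", "5"), ("server.workers", "1"), ("hello", "world")]

def Spec_group_attributes_py (attrs : List (String × String)) (out : List (String × String × Bool)) : Prop := out = group_attributes_py_alt attrs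
instance (attrs : List (String × String)) (out : List (String × String × Bool)) : Decidable (Spec_group_attributes_py attrs out) := by unfold Spec_group_attributes_py; infer_instance

-- ===== CLAIM (what is proved, stated in full; the proofs are below) =====
def Claim_equal_group_attributes_py : Prop := ∀ (attrs : List (String × String)), Dom_group_attributes_py attrs → Pre_group_attributes_py attrs → Spec_group_attributes_py attrs (group_attributes_py attrs)

-- ===== LEMMAS AND PROOFS =====

-- the classification both collection loops perform on one (key, value) pair
def pvSpl (kv : String × String) : Option (String × String × String) :=
  (rsplitDot kv.1.toList).map (fun ps => (String.ofList ps.1, String.ofList ps.2, kv.2))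

def pvDotted (attrs : List (String × String)) : List (String × String × String) :=
  attrs.filterMap pvSpl

def pvFlats (attrs : List (String × String)) : List (String × String) :=
  attrs.filter (fun kv => rsplitDot kv.1.toList = none)

def pvFmt (sv : String × String) : String × String × Bool := ("." ++ sv.1, sv.2, false)

-- the common normal form both programs reach
def pvNorm (attrs : List (String × String)) : List (String × String × Bool) :=
  (PySem.List.sorted (PySem.Set.ofList ((pvDotted attrs).map (·.1))) (fun k => k)).flatMap
    (fun p => (p, "", true) ::
      (PySem.List.sorted (((pvDotted attrs).filter (fun t => t.1 == p)).map (·.2))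
        (fun sv => toLex sv)).map pvFmt)
  ++ (PySem.List.sorted (pvFlats attrs) (fun kv => toLex kv)).map (fun kv => (kv.1, kv.2, false))

theorem pvFmt_def : pvFmt = fun sv => ("." ++ sv.1, sv.2, false) := rfl

-- ---- the two collection loops compute (pvDotted, pvFlats) ----

theorem foldA_eq (attrs : List (String × String))
    (g : PySem.Dict String (List (String × String))) (fl : List (String × String)) :
    attrs.foldl
      (fun (st : PySem.Dict String (List (String × String)) × List (String × String)) kv =>
        match rsplitDot kv.1.toList with
        | some ps => (st.1.modify (String.ofList ps.1) [] (· ++ [(String.ofList ps.2, kv.2)]), st.2)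
        | none => (st.1, st.2 ++ [(kv.1, kv.2)])) (g, fl)
    = ((pvDotted attrs).foldl (fun d t => d.modify t.1 [] (· ++ [t.2])) g, fl ++ pvFlats attrs) := by
  induction attrs generalizing g fl with
  | nil => simp [pvDotted, pvFlats]
  | cons kv rest ih =>
    simp only [List.foldl_cons]
    cases h : rsplitDot kv.1.toList with
    | none =>
      have hd : pvDotted (kv :: rest) = pvDotted rest := by simp [pvDotted, pvSpl, h]
      have hf : pvFlats (kv :: rest) = kv :: pvFlats rest := by simp [pvFlats, h]
      rw [ih]
      simp [hd, hf]
    | some ps =>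
      have hd : pvDotted (kv :: rest)
          = (String.ofList ps.1, String.ofList ps.2, kv.2) :: pvDotted rest := by
        simp [pvDotted, pvSpl, h]
      have hf : pvFlats (kv :: rest) = pvFlats rest := by simp [pvFlats, h]
      rw [ih]
      simp [hd, hf]

theorem foldB_eq (attrs : List (String × String))
    (ts : List (String × String × String)) (fl : List (String × String)) :
    attrs.foldl
      (fun (st : List (String × String × String) × List (String × String)) kv =>
        match rsplitDot kv.1.toList with
        | some ps => (st.1 ++ [(String.ofList ps.1, String.ofList ps.2, kv.2)], st.2)
        | none => (st.1, st.2 ++ [(kv.1, kv.2)])) (ts, fl)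
    = (ts ++ pvDotted attrs, fl ++ pvFlats attrs) := by
  induction attrs generalizing ts fl with
  | nil => simp [pvDotted, pvFlats]
  | cons kv rest ih =>
    simp only [List.foldl_cons]
    cases h : rsplitDot kv.1.toList with
    | none =>
      have hd : pvDotted (kv :: rest) = pvDotted rest := by simp [pvDotted, pvSpl, h]
      have hf : pvFlats (kv :: rest) = kv :: pvFlats rest := by simp [pvFlats, h]
      rw [ih]
      simp [hd, hf]
    | some ps =>
      have hd : pvDotted (kv :: rest)
          = (String.ofList ps.1, String.ofList ps.2, kv.2) :: pvDotted rest := by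
        simp [pvDotted, pvSpl, h]
      have hf : pvFlats (kv :: rest) = pvFlats rest := by simp [pvFlats, h]
      rw [ih]
      simp [hd, hf]

-- ---- rsplit reconstruction: the split determines the key ----

theorem rsplitDot_some : ∀ (cs : List Char) (ps : List Char × List Char),
    rsplitDot cs = some ps → cs = ps.1 ++ '.' :: ps.2 := by
  intro cs
  induction cs with
  | nil => intro ps h; simp [rsplitDot] at h
  | cons c rest ih =>
    intro ps h
    cases h2 : rsplitDot rest with
    | some qs =>
      rw [rsplitDot, h2] at h
      cases h
      simpa using ih qs h2
    | none =>
      rw [rsplitDot, h2] at h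
      by_cases hc : c = '.'
      · rw [if_pos hc] at h
        cases h
        simp [hc]
      · rw [if_neg hc] at h
        cases h

-- distinct keys give distinct (prefix, suffix) pairs among the dotted triples
theorem dotted_pairs_nodup (attrs : List (String × String))
    (h : Pre_group_attributes_py attrs) :
    ((pvDotted attrs).map (fun t => (t.1, t.2.1))).Nodup := by
  have hrw : (pvDotted attrs).map (fun t => (t.1, t.2.1))
      = (attrs.map (·.1)).filterMap
          (fun k => (rsplitDot k.toList).map (fun ps => (String.ofList ps.1, String.ofList ps.2))) := by
    simp only [pvDotted, List.map_filterMap, List.filterMap_map]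
    apply List.filterMap_congr
    intro kv _
    cases h2 : rsplitDot kv.1.toList with
    | none => simp [pvSpl, h2]
    | some ps => simp [pvSpl, h2]
  rw [hrw]
  apply List.Nodup.filterMap _ h
  intro a b c hca hcb
  obtain ⟨ps, hps, hc1⟩ := Option.map_eq_some_iff.mp (Option.mem_def.mp hca)
  obtain ⟨qs, hqs, hc2⟩ := Option.map_eq_some_iff.mp (Option.mem_def.mp hcb)
  have ha := rsplitDot_some _ _ hps
  have hb := rsplitDot_some _ _ hqs
  apply String.toList_inj.mp
  rw [ha, hb]
  have h1 : ps.1 = qs.1 := by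
    have := congrArg (fun x : String × String => x.1.toList) (hc1.trans hc2.symm)
    simpa using this
  have h2 : ps.2 = qs.2 := by
    have := congrArg (fun x : String × String => x.2.toList) (hc1.trans hc2.symm)
    simpa using this
  rw [h1, h2]

-- ---- the partition permutation: distinct prefixes × filtered blocks ~ the triples ----

theorem count_flatMap_filter (l : List (String × String × String)) (t : String × String × String) :
    ∀ (PS : List String), PS.Nodup →
      (PS.flatMap (fun p => l.filter (fun x => x.1 == p))).count t
        = if t.1 ∈ PS then l.count t else 0 := by
  intro PS
  induction PS with
  | nil => simp
  | cons p rest ih =>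
    intro hnd
    rw [List.nodup_cons] at hnd
    have hcf : (l.filter (fun x => x.1 == p)).count t
        = if t.1 = p then l.count t else 0 := by
      by_cases htp : t.1 = p
      · rw [if_pos htp]
        exact List.count_filter (by simp [htp])
      · rw [if_neg htp]
        exact List.count_eq_zero.mpr (fun hmem => htp (by simpa using (List.of_mem_filter hmem)))
    simp only [List.flatMap_cons, List.count_append, hcf, ih hnd.2, List.mem_cons]
    by_cases htp : t.1 = p
    · subst htp
      simp [hnd.1]
    · simp [htp]

theorem partition_perm (l : List (String × String × String)) :
    ((PySem.Set.ofList (l.map (·.1))).flatMap (fun p => l.filter (fun x => x.1 == p))).Perm l := by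
  rw [List.perm_iff_count]
  intro t
  rw [count_flatMap_filter l t _ (PySem.Set.nodup_ofList _)]
  by_cases ht : t.1 ∈ PySem.Set.ofList (l.map (·.1))
  · rw [if_pos ht]
  · rw [if_neg ht]
    symm
    exact List.count_eq_zero.mpr
      (fun hmem => ht (by exact (PySem.Set.mem_ofList _ _).mpr (List.mem_map.mpr ⟨t, hmem, rfl⟩)))

-- ---- the global sort splits into sorted blocks over sorted distinct prefixes ----

theorem sorted_partition (ts : List (String × String × String))
    (hnd : (ts.map (fun t => (t.1, t.2.1))).Nodup) :
    PySem.List.sorted ts (fun t => toLex (t.1, t.2.1)) =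
      (PySem.List.sorted (PySem.Set.ofList (ts.map (·.1))) (fun k => k)).flatMap
        (fun p => (PySem.List.sorted ((ts.filter (fun t => t.1 == p)).map (·.2))
          (fun sv => toLex sv)).map (fun sv => (p, sv))) := by
  have h0 : List.Pairwise (fun a b => (a.1, a.2.1) ≠ (b.1, b.2.1)) ts := List.pairwise_map.mp hnd
  -- per-prefix facts
  have hsuffix : ∀ p : String,
      ((ts.filter (fun t => t.1 == p)).map (·.2)).Pairwise (fun a b => a.1 ≠ b.1) := by
    intro p
    have h1 := h0.filter (fun t => t.1 == p)
    have h2 := List.Pairwise.and_mem.mp h1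
    rw [List.pairwise_map]
    refine h2.imp ?_
    rintro a b ⟨ha, hb, hpair⟩
    have ha1 : a.1 = p := by simpa using (List.of_mem_filter ha)
    have hb1 : b.1 = p := by simpa using (List.of_mem_filter hb)
    intro hsnd
    exact hpair (by rw [Prod.ext_iff]; exact ⟨ha1.trans hb1.symm, hsnd⟩)
  apply PySem.List.sorted_eq_of_perm_of_pairwise_lt
  · -- permutation
    refine List.Perm.trans (List.Perm.flatMap_left _ ?_) (List.Perm.trans
      (List.Perm.flatMap_right (fun p => ts.filter (fun x => x.1 == p))
        (PySem.List.sorted_perm _ _ _)) (partition_perm ts))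
    intro p _
    have hmap : ((ts.filter (fun t => t.1 == p)).map (·.2)).map (fun sv => (p, sv))
        = ts.filter (fun t => t.1 == p) := by
      rw [List.map_map]
      refine (List.map_congr_left ?_).trans (List.map_id _)
      intro t ht
      have : t.1 = p := by simpa using (List.of_mem_filter ht)
      simp [Function.comp, ← this]
    conv_rhs => rw [← hmap]
    exact (PySem.List.sorted_perm ((ts.filter (fun t => t.1 == p)).map (·.2))
      (fun sv => toLex sv) false).map _
  · -- strictly increasing in the (prefix, suffix) key
    rw [List.flatMap_def, List.pairwise_flatten]
    constructor
    · intro l hl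
      obtain ⟨p, _, rfl⟩ := List.mem_map.mp hl
      rw [List.pairwise_map]
      have hle := PySem.List.sorted_pairwise ((ts.filter (fun t => t.1 == p)).map (·.2))
        (fun sv => toLex sv)
      have hnodup : (PySem.List.sorted ((ts.filter (fun t => t.1 == p)).map (·.2))
          (fun sv => toLex sv)).Pairwise (fun a b => a.1 ≠ b.1) :=
        (hsuffix p).perm
          (PySem.List.sorted_perm ((ts.filter (fun t => t.1 == p)).map (·.2))
            (fun sv => toLex sv) false).symm
          (fun {_ _} hab => Ne.symm hab)
      refine (hle.and hnodup).imp ?_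
      rintro a b ⟨hab, hne⟩
      rcases Prod.Lex.toLex_le_toLex.mp hab with hlt | ⟨heq, _⟩
      · exact Prod.Lex.toLex_lt_toLex.mpr (Or.inr ⟨rfl, hlt⟩)
      · exact absurd heq hne
    · have hps := PySem.List.sorted_ofList_pairwise_lt (ts.map (·.1))
      rw [List.pairwise_map]
      refine hps.imp ?_
      intro p q hpq x hx y hy
      obtain ⟨sv, _, rfl⟩ := List.mem_map.mp hx
      obtain ⟨sw, _, rfl⟩ := List.mem_map.mp hy
      exact Prod.Lex.toLex_lt_toLex.mpr (Or.inl hpq)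

-- ---- the sweep over pre-sorted blocks emits exactly header + lines per block ----

theorem sweep_block (svs : List (String × String)) (p : String)
    (res : List (String × String × Bool)) :
    List.foldl
      (fun (acc : List (String × String × Bool) × Option String) t =>
        let acc1 := if acc.2 ≠ some t.1 then (acc.1 ++ [(t.1, "", true)], some t.1) else acc
        (acc1.1 ++ [("." ++ t.2.1, t.2.2, false)], acc1.2))
      (res, some p) (svs.map (fun sv => (p, sv)))
    = (res ++ svs.map pvFmt, some p) := by
  induction svs generalizing res with
  | nil => simp
  | cons sv rest ih =>
    simp only [List.map_cons, List.foldl_cons]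
    have hcond : ¬ ((some p : Option String) ≠ some (p, sv).1) := by simp
    rw [if_neg hcond]
    rw [ih]
    simp [pvFmt]

theorem sweep_fold (ps : List String) (grp : String → List (String × String))
    (res0 : List (String × String × Bool)) (prev0 : Option String)
    (hpw : ps.Pairwise (fun a b => a ≠ b))
    (hprev : ∀ p ∈ ps, prev0 ≠ some p)
    (hne : ∀ p ∈ ps, grp p ≠ []) :
    (List.foldl
      (fun (acc : List (String × String × Bool) × Option String) t =>
        let acc1 := if acc.2 ≠ some t.1 then (acc.1 ++ [(t.1, "", true)], some t.1) else acc
        (acc1.1 ++ [("." ++ t.2.1, t.2.2, false)], acc1.2))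
      (res0, prev0) (ps.flatMap (fun p => (grp p).map (fun sv => (p, sv))))).1
    = res0 ++ ps.flatMap (fun p => (p, "", true) :: (grp p).map pvFmt) := by
  induction ps generalizing res0 prev0 with
  | nil => simp
  | cons p rest ih =>
    obtain ⟨sv, svs, hg⟩ := List.exists_cons_of_ne_nil (hne p (List.mem_cons_self))
    rw [List.pairwise_cons] at hpw
    simp only [List.flatMap_cons, List.foldl_append]
    rw [hg]
    simp only [List.map_cons, List.foldl_cons]
    have hcond : prev0 ≠ some (p, sv).1 := hprev p (List.mem_cons_self)
    rw [if_pos hcond]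
    rw [sweep_block]
    rw [ih _ _ hpw.2 (fun q hq h => (hpw.1 q hq) (by simpa using h))
        (fun q hq => hne q (List.mem_cons_of_mem _ hq))]
    simp [pvFmt]

-- ---- A reaches the normal form ----

theorem a_eq_norm (attrs : List (String × String)) :
    group_attributes_py attrs = pvNorm attrs := by
  by_cases hnil : attrs = []
  · subst hnil; rfl
  · unfold group_attributes_py
    rw [if_neg hnil]
    rw [foldA_eq]
    have hkeys : ((pvDotted attrs).foldl (fun d t => d.modify t.1 [] (· ++ [t.2]))
        (PySem.Dict.empty : PySem.Dict String (List (String × String)))).keys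
        = PySem.Set.ofList ((pvDotted attrs).map (·.1)) := by
      rw [PySem.Dict.keys_foldl_modify_key (pvDotted attrs) (·.1) []
        (fun _ t => (· ++ [t.2])) PySem.Dict.empty]
      rfl
    simp only [hkeys, PySem.Dict.getD_foldl_modify_append, List.nil_append,
      PySem.List.foldl_append_singleton_eq_map, PySem.List.foldl_append_eq_flatMap,
      List.append_assoc, List.singleton_append, List.nil_append]
    unfold pvNorm
    simp [pvFmt_def]

-- ---- B reaches the normal form ----

theorem b_eq_norm (attrs : List (String × String)) (h : Pre_group_attributes_py attrs) :
    group_attributes_py_alt attrs = pvNorm attrs := by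
  unfold group_attributes_py_alt
  rw [foldB_eq]
  simp only [List.nil_append]
  rw [sorted_partition (pvDotted attrs) (dotted_pairs_nodup attrs h)]
  have hps := PySem.List.sorted_ofList_pairwise_lt ((pvDotted attrs).map (·.1))
  rw [sweep_fold _ _ [] none (hps.imp (fun h => ne_of_lt h)) (by simp) ?hne]
  · unfold pvNorm
    simp [pvFmt_def]
  case hne =>
    intro p hp
    rw [Ne, PySem.List.sorted_eq_nil_iff]
    intro hnilf
    have hp2 : p ∈ (pvDotted attrs).map (·.1) := by
      have := (PySem.List.sorted_perm (PySem.Set.ofList ((pvDotted attrs).map (·.1)))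
        (fun k => k) false).mem_iff.mp hp
      exact (PySem.Set.mem_ofList _ _).mp this
    obtain ⟨t, ht, hteq⟩ := List.mem_map.mp hp2
    have : t.2 ∈ ((pvDotted attrs).filter (fun t => t.1 == p)).map (·.2) :=
      List.mem_map.mpr ⟨t, List.mem_filter.mpr ⟨ht, by simp [hteq]⟩, rfl⟩
    rw [hnilf] at this
    exact absurd this (List.not_mem_nil)

-- ===== VERDICT (by name: the statement is the Claim_ definition above) =====
theorem group_attributes_py_spec : Claim_equal_group_attributes_py := by
  intro attrs _ hpre
  unfold Spec_group_attributes_py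
  rw [a_eq_norm attrs, b_eq_norm attrs hpre]
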